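-- pv_equiv track=rewrite | github.com/mispelledname/GoogleCodeJam_2020 | nesting.py | nesting
-- ===== SOURCE A (Python) =====
-- def nesting(S, num):
--     snum = [int(char) for char in S]
--     sout = ""
--     brackets = 0
--     for i in range(len(snum)):
--         sout += (snum[i] - brackets) * "(" + S[i]
--         brackets += (snum[i] - brackets)
--         if i < len(snum)-1:
--             if snum[i+1] < snum[i]:
--                 sout += ")" * (snum[i] - snum[i+1])
--                 brackets -= (snum[i] - snum[i+1])
--     sout += brackets * ")"
--
--     output = "Case #{}: {}".format(num+1, sout)
--     return output
-- ===== SOURCE B (Python) =====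
-- def nesting(S, num):
--     ds = [int(c) for c in S]
--
--     # Recursive divide-and-conquer on nesting level: within ds[i:j] (all depths >= level),
--     # emit digits equal to level directly and wrap each maximal run of deeper digits
--     # in one "(...)" pair, recursing one level deeper on it.
--     def build(i, j, level):
--         out = []
--         while i < j:
--             if ds[i] == level:
--                 out.append(S[i])
--                 i += 1
--             else:
--                 k = i
--                 while k < j and ds[k] > level:
--                     k += 1
--                 out.append("(" + build(i, k, level + 1) + ")")
--                 i = k
--         return "".join(out)
--
--     return "Case #{}: {}".format(num + 1, build(0, len(ds), 0))
-- ===== Notes on version B (the rewrite author's own statement) =====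
-- stated objective: alternative
-- what changed: Replaces A's single left-to-right pass with a running open-bracket counter and next-digit lookahead by a recursive divide-and-conquer on nesting levels: digits equal to the current level are emitted verbatim and each maximal run of deeper digits is wrapped in one '(...)' pair and processed recursively at level+1.
import Mathlib
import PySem

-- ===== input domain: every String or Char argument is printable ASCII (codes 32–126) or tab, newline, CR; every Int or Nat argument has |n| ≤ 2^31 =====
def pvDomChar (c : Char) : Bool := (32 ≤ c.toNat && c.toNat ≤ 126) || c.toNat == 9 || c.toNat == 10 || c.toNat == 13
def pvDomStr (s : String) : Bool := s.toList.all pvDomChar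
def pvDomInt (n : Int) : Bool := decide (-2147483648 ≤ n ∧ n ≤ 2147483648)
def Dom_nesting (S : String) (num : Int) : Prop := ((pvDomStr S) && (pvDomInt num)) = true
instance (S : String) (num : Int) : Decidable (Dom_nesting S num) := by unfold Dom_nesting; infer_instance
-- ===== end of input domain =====

-- B replaces A's linear pass with a running bracket counter and next-digit lookahead by a
-- recursive divide-and-conquer on nesting levels (wrap each maximal run of deeper digits,
-- recurse one level deeper); objective: alternative.

-- s * k for a character: List.replicate (negative k gives "", like Python)
def pvRep (k : Int) (c : Char) : List Char := List.replicate k.toNat c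

-- int(char): exact for digit characters (the only ones Pre_ admits; elsewhere Python raises ValueError)
def pvDigit (c : Char) : Int := (c.toNat : Int) - 48

-- ===== PORT A =====
-- the for-loop of A as structural recursion over the remaining characters;
-- state: brackets (the open-depth counter); lookahead on the next character as in A
def nestingLoopA : Int → List Char → List Char
  | brackets, [] => pvRep brackets ')'                      -- sout += brackets * ")"
  | brackets, c :: rest =>
    let d := pvDigit c
    let step := pvRep (d - brackets) '(' ++ [c]             -- sout += (snum[i]-brackets)*"(" + S[i]
    match rest with
    | [] => step ++ pvRep d ')'          -- loop ends; sout += brackets * ")" with brackets = d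
    | c2 :: _ =>
      if pvDigit c2 < d then                                -- if snum[i+1] < snum[i]
        step ++ pvRep (d - pvDigit c2) ')' ++ nestingLoopA (d - (d - pvDigit c2)) rest
      else
        step ++ nestingLoopA d rest

def nesting (S : String) (num : Int) : String :=
  "Case #" ++ PySem.Int.toStr (num + 1) ++ ": " ++ String.ofList (nestingLoopA 0 S.toList)

-- ===== PORT B =====
-- measure for the level recursion: region length plus total remaining depth above the level
def pvMeas (level : Int) (ds : List (Char × Int)) : Nat :=
  ds.length + (ds.map fun p => (p.2 - level).toNat).sum

theorem pvSumShift (level : Int) : ∀ ds : List (Char × Int), (∀ p ∈ ds, level < p.2) →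
    (ds.map fun p => (p.2 - (level + 1)).toNat).sum + ds.length
      = (ds.map fun p => (p.2 - level).toNat).sum := by
  intro ds h
  induction ds with
  | nil => simp
  | cons x xs ih =>
    have hx := h x (by simp)
    have := ih (fun p hp => h p (by simp [hp]))
    simp only [List.map_cons, List.sum_cons, List.length_cons]
    omega

theorem pvMeas_cons (level : Int) (c : Char) (d : Int) (rest : List (Char × Int)) :
    pvMeas level rest < pvMeas level ((c, d) :: rest) := by
  simp [pvMeas]
  omega

theorem pvMeas_take (level : Int) (c : Char) (d : Int) (rest : List (Char × Int)) (_h : level < d) :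
    pvMeas (level + 1) (((c, d) :: rest).takeWhile fun p => decide (level < p.2))
      < pvMeas level ((c, d) :: rest) := by
  have hall : ∀ p ∈ ((c, d) :: rest).takeWhile fun p => decide (level < p.2), level < p.2 := by
    intro p hp
    have := List.mem_takeWhile_imp hp
    simpa using this
  have hsub : (((c, d) :: rest).takeWhile fun p => decide (level < p.2)).Sublist ((c, d) :: rest) :=
    List.takeWhile_sublist _
  have hsum : ((((c, d) :: rest).takeWhile fun p => decide (level < p.2)).map
      fun p => (p.2 - level).toNat).sum ≤ (((c, d) :: rest).map fun p => (p.2 - level).toNat).sum :=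
    List.Sublist.sum_le_sum (hsub.map _) (by intro x hx; exact Nat.zero_le x)
  have := pvSumShift level _ hall
  simp only [pvMeas, List.map_cons, List.sum_cons, List.length_cons] at *
  omega

theorem pvMeas_drop (level : Int) (c : Char) (d : Int) (rest : List (Char × Int)) (h : level < d) :
    pvMeas level (((c, d) :: rest).dropWhile fun p => decide (level < p.2))
      < pvMeas level ((c, d) :: rest) := by
  have hdw : (((c, d) :: rest).dropWhile fun p => decide (level < p.2))
      = rest.dropWhile fun p => decide (level < p.2) := by
    simp [h]
  have hsub : (rest.dropWhile fun p => decide (level < p.2)).Sublist rest :=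
    List.dropWhile_sublist _
  have hsum : ((rest.dropWhile fun p => decide (level < p.2)).map
      fun p => (p.2 - level).toNat).sum ≤ (rest.map fun p => (p.2 - level).toNat).sum :=
    List.Sublist.sum_le_sum (hsub.map _) (by intro x hx; exact Nat.zero_le x)
  have hlen : (rest.dropWhile fun p => decide (level < p.2)).length ≤ rest.length :=
    hsub.length_le
  rw [hdw]
  simp only [pvMeas, List.map_cons, List.sum_cons, List.length_cons]
  omega

-- B's build(i, j, level): the region is the list of (char, digit) pairs; the while loop is
-- structural recursion on the region, the inner k-scan is takeWhile/dropWhile.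
-- Python tests ds[i] == level; for d < level (unreachable: Pre_ gives digits ≥ 0 and every
-- region satisfies d ≥ level) Python would loop forever, so `d ≤ level` totalizes it.
def buildR (level : Int) : List (Char × Int) → List Char
  | [] => []
  | (c, d) :: rest =>
    if d ≤ level then c :: buildR level rest
    else
      ('(' :: buildR (level + 1) (((c, d) :: rest).takeWhile fun p => decide (level < p.2)))
        ++ ')' :: buildR level (((c, d) :: rest).dropWhile fun p => decide (level < p.2))
termination_by ds => pvMeas level ds
decreasing_by
  · exact pvMeas_cons level c d rest
  · exact pvMeas_take level c d rest (by omega)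
  · exact pvMeas_drop level c d rest (by omega)

def nesting_alt (S : String) (num : Int) : String :=
  -- ds = [int(c) for c in S], kept beside its character as a pair; build(0, len(ds), 0)
  "Case #" ++ PySem.Int.toStr (num + 1) ++ ": "
    ++ String.ofList (buildR 0 (S.toList.map fun c => (c, pvDigit c)))

-- ===== PRECONDITION & SPEC =====
-- Pre_ admits exactly the digit strings: on any other character both Pythons raise ValueError at int(char).
def Pre_nesting (S : String) (num : Int) : Prop :=
  (S.toList.all fun c => 48 ≤ c.toNat && c.toNat ≤ 57) = true
instance (S : String) (num : Int) : Decidable (Pre_nesting S num) := by unfold Pre_nesting; infer_instance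
def pvWitness_nesting : String × Int := ("021231", 0)

def Spec_nesting (S : String) (num : Int) (out : String) : Prop := out = nesting_alt S num
instance (S : String) (num : Int) (out : String) : Decidable (Spec_nesting S num out) := by unfold Spec_nesting; infer_instance

-- ===== CLAIM (what is proved, stated in full; the proofs are below) =====
def Claim_equal_nesting : Prop := ∀ (S : String) (num : Int), Dom_nesting S num → Pre_nesting S num → Spec_nesting S num (nesting S num)

-- ===== LEMMAS AND PROOFS =====

-- the previous-digit pass: proof-side middle point between A's loop and B's recursion
def pvPrev : Int → List Char → List Char
  | prev, [] => pvRep prev ')'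
  | prev, c :: rest =>
    let d := pvDigit c
    (if d > prev then pvRep (d - prev) '(' else pvRep (prev - d) ')')
      ++ [c] ++ pvPrev d rest

-- the same pass on (char, depth) pairs, closing only down to `bottom` at the end
def pvLoopP (bottom : Int) : Int → List (Char × Int) → List Char
  | prev, [] => pvRep (prev - bottom) ')'
  | prev, (c, d) :: rest =>
    (if d > prev then pvRep (d - prev) '(' else pvRep (prev - d) ')')
      ++ [c] ++ pvLoopP bottom d rest

-- A's output around character i, re-grouped: the closers A emits at the END of step i-1
-- are exactly the prev-pass's closing delta at the START of step i.
def pvATail (prev : Int) : List Char → List Char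
  | [] => pvRep prev ')'
  | c :: rest =>
    (if pvDigit c < prev then pvRep (prev - pvDigit c) ')' else [])
      ++ nestingLoopA (min prev (pvDigit c)) (c :: rest)

theorem pvRep_nonpos {k : Int} (h : k ≤ 0) (c : Char) : pvRep k c = [] := by
  simp [pvRep, Int.toNat_of_nonpos h]

theorem pvRep_zero (c : Char) : pvRep 0 c = [] := rfl

theorem loopPrev_cons (prev : Int) (c : Char) (rest : List Char) :
    pvPrev prev (c :: rest)
      = (if pvDigit c > prev then pvRep (pvDigit c - prev) '(' else pvRep (prev - pvDigit c) ')')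
          ++ [c] ++ pvPrev (pvDigit c) rest := rfl

theorem loopA_cons_nil (b : Int) (c : Char) :
    nestingLoopA b [c] = (pvRep (pvDigit c - b) '(' ++ [c]) ++ pvRep (pvDigit c) ')' := rfl

theorem loopA_cons_cons (b : Int) (c c2 : Char) (rest2 : List Char) :
    nestingLoopA b (c :: c2 :: rest2)
      = if pvDigit c2 < pvDigit c then
          (pvRep (pvDigit c - b) '(' ++ [c]) ++ pvRep (pvDigit c - pvDigit c2) ')'
            ++ nestingLoopA (pvDigit c - (pvDigit c - pvDigit c2)) (c2 :: rest2)
        else (pvRep (pvDigit c - b) '(' ++ [c]) ++ nestingLoopA (pvDigit c) (c2 :: rest2) := rfl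

theorem pvATail_cons (prev : Int) (c : Char) (rest : List Char) :
    pvATail prev (c :: rest)
      = (if pvDigit c < prev then pvRep (prev - pvDigit c) ')' else [])
          ++ nestingLoopA (min prev (pvDigit c)) (c :: rest) := rfl

-- the prev-pass delta between prev and d is exactly A's end-of-previous-step closers followed
-- by A's current-step openers (brackets entering the step being min prev d)
theorem delta_eq (prev d : Int) :
    (if d > prev then pvRep (d - prev) '(' else pvRep (prev - d) ')')
      = (if d < prev then pvRep (prev - d) ')' else []) ++ pvRep (d - min prev d) '(' := by
  rcases lt_trichotomy d prev with h | h | h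
  · rw [if_neg (by omega), if_pos h, min_eq_right (le_of_lt h),
      pvRep_nonpos (by omega) '(']
    simp
  · subst h
    rw [if_neg (lt_irrefl d), if_neg (lt_irrefl d), min_self]
    simp [pvRep_zero]
  · rw [if_pos h, if_neg (by omega), min_eq_left (le_of_lt h)]
    simp

theorem loopPrev_eq_ATail (cs : List Char) : ∀ prev : Int, pvPrev prev cs = pvATail prev cs := by
  induction cs with
  | nil => intro prev; rfl
  | cons c rest ih =>
    intro prev
    rw [loopPrev_cons, ih, pvATail_cons]
    rcases rest with _ | ⟨c2, rest2⟩
    · rw [loopA_cons_nil, delta_eq]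
      simp [pvATail, List.append_assoc]
    · rw [loopA_cons_cons, pvATail_cons, delta_eq]
      by_cases h2 : pvDigit c2 < pvDigit c
      · rw [if_pos h2, if_pos h2, min_eq_right (le_of_lt h2)]
        have e : pvDigit c - (pvDigit c - pvDigit c2) = pvDigit c2 := by omega
        rw [e]; simp [List.append_assoc]
      · rw [if_neg h2, if_neg h2, min_eq_left (not_lt.mp h2)]
        simp [List.append_assoc]

theorem loopA_eq_loopPrev {cs : List Char} (h : ∀ c ∈ cs, 0 ≤ pvDigit c) :
    nestingLoopA 0 cs = pvPrev 0 cs := by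
  rw [loopPrev_eq_ATail]
  cases cs with
  | nil => simp [pvATail, nestingLoopA]
  | cons c rest =>
    have hd : 0 ≤ pvDigit c := h c (List.mem_cons_self ..)
    simp only [pvATail]
    rw [if_neg (not_lt.mpr hd), min_eq_left hd, List.nil_append]

-- prev-pass on chars = pvLoopP with bottom 0 on the paired list
theorem pvPrev_eq_loopP (cs : List Char) : ∀ prev : Int,
    pvPrev prev cs = pvLoopP 0 prev (cs.map fun c => (c, pvDigit c)) := by
  induction cs with
  | nil => intro prev; simp [pvPrev, pvLoopP]
  | cons c rest ih =>
    intro prev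
    simp only [List.map_cons, pvPrev, pvLoopP, ih]

-- splitting a region at a point where the depth returns to bottom
theorem pvSplit (bottom : Int) (rest' : List (Char × Int))
    (hrest : rest' = [] ∨ ∃ c0 rs, rest' = (c0, bottom) :: rs) :
    ∀ run : List (Char × Int), (∀ p ∈ run, bottom ≤ p.2) → ∀ prev : Int, bottom ≤ prev →
    pvLoopP bottom prev (run ++ rest') = pvLoopP bottom prev run ++ pvLoopP bottom bottom rest' := by
  intro run
  induction run with
  | nil =>
    intro _ prev hprev
    rcases hrest with h | ⟨c0, rs, h⟩ <;> subst h
    · simp [pvLoopP, pvRep_zero]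
    · simp only [List.nil_append, pvLoopP]
      rw [if_neg (by omega), if_neg (by omega)]
      simp [pvRep_zero]
  | cons x xs ih =>
    intro hall prev _
    obtain ⟨c, d⟩ := x
    have hd : bottom ≤ d := hall (c, d) (by simp)
    simp only [List.cons_append, pvLoopP]
    rw [ih (fun p hp => hall p (by simp [hp])) d hd]
    simp [List.append_assoc]

-- opening one more bracket in front when the head digit is above prev
theorem pvOpen (bottom prev : Int) (c : Char) (d : Int) (rest : List (Char × Int)) (h : prev < d) :
    pvLoopP bottom prev ((c, d) :: rest) = '(' :: pvLoopP bottom (prev + 1) ((c, d) :: rest) := by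
  simp only [pvLoopP]
  rw [if_pos (by omega)]
  have h1 : pvRep (d - prev) '(' = '(' :: pvRep (d - (prev + 1)) '(' := by
    have : (d - prev).toNat = (d - (prev + 1)).toNat + 1 := by omega
    simp [pvRep, this, List.replicate_succ]
  rw [h1]
  by_cases h2 : d > prev + 1
  · rw [if_pos h2]; simp
  · have hd : d = prev + 1 := by omega
    rw [if_neg h2, hd]
    simp [pvRep_zero]

-- raising the bottom by one peels one trailing closer off
theorem pvBottom (bottom : Int) : ∀ ds : List (Char × Int), (∀ p ∈ ds, bottom + 1 ≤ p.2) →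
    ∀ prev : Int, bottom + 1 ≤ prev →
    pvLoopP bottom prev ds = pvLoopP (bottom + 1) prev ds ++ [')'] := by
  intro ds
  induction ds with
  | nil =>
    intro _ prev hprev
    have : (prev - bottom).toNat = (prev - (bottom + 1)).toNat + 1 := by omega
    simp [pvLoopP, pvRep, this, List.replicate_succ']
  | cons x xs ih =>
    intro hall prev _
    obtain ⟨c, d⟩ := x
    have hd : bottom + 1 ≤ d := hall (c, d) (by simp)
    simp only [pvLoopP]
    rw [ih (fun p hp => hall p (by simp [hp])) d hd]
    simp [List.append_assoc]

theorem dropWhile_head_false {α : Type} (p : α → Bool) :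
    ∀ l : List α, ∀ x : α, ∀ xs : List α, l.dropWhile p = x :: xs → p x = false := by
  intro l
  induction l with
  | nil => intro x xs h; simp [List.dropWhile] at h
  | cons y ys ih =>
    intro x xs h
    by_cases hy : p y = true
    · rw [List.dropWhile_cons_of_pos hy] at h; exact ih x xs h
    · rw [List.dropWhile_cons_of_neg (by simpa using hy)] at h
      cases h; simpa using hy

-- main lemma: on a region whose depths all sit at or above `level`,
-- B's level recursion equals the pass pvLoopP started and bottomed at `level`
theorem buildR_eq_loopP : ∀ n : Nat, ∀ level : Int, ∀ ds : List (Char × Int),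
    pvMeas level ds ≤ n → (∀ p ∈ ds, level ≤ p.2) →
    buildR level ds = pvLoopP level level ds := by
  intro n
  induction n using Nat.strong_induction_on with
  | _ n ih =>
    intro level ds hm hall
    match ds with
    | [] => simp [buildR, pvLoopP, pvRep_zero]
    | (c, d) :: rest =>
      have hd : level ≤ d := hall (c, d) (by simp)
      by_cases hle : d ≤ level
      · have hdl : d = level := le_antisymm hle hd
        rw [buildR, if_pos hle]
        have hm' := pvMeas_cons level c d rest
        rw [ih (pvMeas level rest) (by omega) level rest le_rfl
            (fun p hp => hall p (by simp [hp]))]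
        subst hdl
        simp [pvLoopP, pvRep_zero]
      · have hlt : level < d := by omega
        rw [buildR, if_neg hle]
        have hresthead : (((c, d) :: rest).dropWhile fun p => decide (level < p.2)) = [] ∨
            ∃ c0 rs, (((c, d) :: rest).dropWhile fun p => decide (level < p.2))
              = (c0, level) :: rs := by
          match h : ((c, d) :: rest).dropWhile fun p => decide (level < p.2) with
          | [] => exact Or.inl h
          | (c0, d0) :: rs =>
            have hf : decide (level < d0) = false :=
              dropWhile_head_false (fun p : Char × Int => decide (level < p.2))
                ((c, d) :: rest) (c0, d0) rs h
            have hmem : (c0, d0) ∈ (c, d) :: rest := by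
              refine (List.dropWhile_sublist (fun p : Char × Int => decide (level < p.2))).subset ?_
              rw [h]; simp
            have hle0 : level ≤ d0 := hall _ hmem
            have hd0 : d0 = level := by simp at hf; omega
            exact Or.inr ⟨c0, rs, by rw [h, hd0]⟩
        set run := ((c, d) :: rest).takeWhile fun p => decide (level < p.2) with hrun
        set rest' := ((c, d) :: rest).dropWhile fun p => decide (level < p.2) with hrest'
        have hsplitlist : run ++ rest' = (c, d) :: rest := List.takeWhile_append_dropWhile ..
        have hrunall : ∀ p ∈ run, level < p.2 := by
          intro p hp; have := List.mem_takeWhile_imp hp; simpa using this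
        have hrestall : ∀ p ∈ rest', level ≤ p.2 := by
          intro p hp
          have : p ∈ (c, d) :: rest := by rw [← hsplitlist]; exact List.mem_append_right _ hp
          exact hall p this
        have hrunhead : run = (c, d) :: rest.takeWhile fun p => decide (level < p.2) := by
          rw [hrun, List.takeWhile_cons_of_pos (by simpa using hlt)]
        -- measures
        have hmt := pvMeas_take level c d rest hlt
        have hmd := pvMeas_drop level c d rest hlt
        have ih1 : buildR (level + 1) run = pvLoopP (level + 1) (level + 1) run :=
          ih (pvMeas (level + 1) run) (by rw [hrun]; omega) (level + 1) run le_rfl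
            (fun p hp => by have := hrunall p hp; omega)
        have ih2 : buildR level rest' = pvLoopP level level rest' :=
          ih (pvMeas level rest') (by rw [hrest']; omega) level rest' le_rfl hrestall
        rw [ih1, ih2]
        -- right-hand side
        have hrhs : pvLoopP level level ((c, d) :: rest)
            = pvLoopP level level run ++ pvLoopP level level rest' := by
          rw [← hsplitlist]
          exact pvSplit level rest' hresthead run (fun p hp => le_of_lt (hrunall p hp)) level le_rfl
        have hopen : pvLoopP level level run = '(' :: pvLoopP level (level + 1) run := by
          rw [hrunhead]; exact pvOpen level level c d _ hlt
        have hbot : pvLoopP level (level + 1) run = pvLoopP (level + 1) (level + 1) run ++ [')'] :=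
          pvBottom level run (fun p hp => hrunall p hp) (level + 1) le_rfl
        rw [hrhs, hopen, hbot]
        simp [List.append_assoc]

-- ===== VERDICT (by name: the statement is the Claim_ definition above) =====
theorem nesting_spec : Claim_equal_nesting := by
  intro S num _dom pre
  show nesting S num = nesting_alt S num
  unfold nesting nesting_alt
  have h : ∀ c ∈ S.toList, 0 ≤ pvDigit c := by
    intro c hc
    have := List.all_eq_true.mp pre c hc
    simp only [Bool.and_eq_true, decide_eq_true_eq] at this
    simp [pvDigit]; omega
  have hpairs : ∀ p ∈ (S.toList.map fun c => (c, pvDigit c)), (0 : Int) ≤ p.2 := by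
    intro p hp
    obtain ⟨c, hc, rfl⟩ := List.mem_map.mp hp
    exact h c hc
  rw [loopA_eq_loopPrev h, pvPrev_eq_loopP,
    buildR_eq_loopP (pvMeas 0 (S.toList.map fun c => (c, pvDigit c))) 0 _ le_rfl hpairs]
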